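-- pv_equiv track=rewrite | github.com/tnv1154/Python-Ptit | PY01071_Python file.py | check
-- ===== SOURCE A (Python) =====
-- def check(s):
--     if len(s) < 1 or len(s) > 128:
--         return False
--     a = s.split(".")
--     if len(a) != 2:
--         return False
--     if a[1].lower() != "py":
--         return False
--     for i in a[0]:
--         if not ( ('a' <= i <= 'z') or ('A' <= i <'Z') or i == '.' or i == '_' ):
--             return False
--     return True
-- ===== SOURCE B (Python) =====
-- def check(s):
--     # Single left-to-right scan: skip the maximal run of identifier
--     # characters (ASCII letters or '_'), then the remainder must be
--     # exactly a case-insensitive ".py".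
--     if not (1 <= len(s) <= 128):
--         return False
--     i = 0
--     while i < len(s) and (('A' <= s[i] <= 'Z') or ('a' <= s[i] <= 'z') or s[i] == '_'):
--         i += 1
--     rest = s[i:]
--     return len(rest) == 3 and rest[0] == '.' and rest[1] in 'pP' and rest[2] in 'yY'
-- ===== Notes on version B (the rewrite author's own statement) =====
-- stated objective: simpler
-- what changed: Replaces A's split('.')-into-parts pipeline (split, part count, lowercased extension compare, per-character base loop) with a single left-to-right scan that skips the maximal run of identifier characters and then checks the remainder is exactly a case-insensitive '.py'.
-- intended difference: On filenames of the form base.py (case-insensitive extension, length<=128) whose base is ASCII letters/underscores and contains 'Z', A returns False because its uppercase test 'A' <= i < 'Z' accidentally excludes 'Z', while B returns True, the intended answer for a filename validator. — e.g. on check("Z.py"): A returns false, B returns true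
import Mathlib
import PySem

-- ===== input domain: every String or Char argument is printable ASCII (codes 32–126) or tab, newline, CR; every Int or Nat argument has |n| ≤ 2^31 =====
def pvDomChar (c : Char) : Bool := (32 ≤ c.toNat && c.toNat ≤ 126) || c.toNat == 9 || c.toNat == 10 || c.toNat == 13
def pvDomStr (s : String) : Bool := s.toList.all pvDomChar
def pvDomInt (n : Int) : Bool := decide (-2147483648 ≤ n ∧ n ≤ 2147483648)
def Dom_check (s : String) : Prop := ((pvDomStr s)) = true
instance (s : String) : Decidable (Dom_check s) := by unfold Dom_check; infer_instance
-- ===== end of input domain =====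

-- B replaces A's split('.')-based pipeline with a single scan (skip identifier chars, then expect
-- ".py" case-insensitively). A's uppercase test 'A' <= i < 'Z' accidentally excludes 'Z'; B allows
-- it — this intended difference is stated as D_check and proved exact; elsewhere A = B is proved.


-- ===== PORT A =====
-- A's per-character test from the for-loop (the dead 'i == "."' disjunct is kept as written)
def pvOkA (i : Char) : Bool :=
  (decide ('a' ≤ i) && decide (i ≤ 'z')) || (decide ('A' ≤ i) && decide (i < 'Z'))
    || i == '.' || i == '_'

def check (s : String) : Bool :=
  if PySem.Str.len s < 1 ∨ PySem.Str.len s > 128 then false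
  else
    match PySem.Str.split? s "." with
    | none => false      -- unreachable: the separator "." is nonempty
    | some a =>
      if a.length ≠ 2 then false
      else
        match a with
        | [a0, a1] =>
          if PySem.Str.lower a1 ≠ "py" then false
          else a0.toList.all pvOkA    -- the for-loop with its early 'return False'
        | _ => false

-- ===== PORT B =====
-- B's identifier-character test: ASCII letter or underscore
def pvInClass (c : Char) : Bool :=
  (decide ('A' ≤ c) && decide (c ≤ 'Z')) || (decide ('a' ≤ c) && decide (c ≤ 'z')) || c == '_'

-- B's while-loop: the index i where the scan stops = dropWhile; rest = s[i:], then
-- len(rest) == 3 and rest[0] == '.' and rest[1] in 'pP' and rest[2] in 'yY'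
def pvTail (l : List Char) : Bool :=
  let rest := l.dropWhile pvInClass
  decide (rest.length = 3) && (PySem.List.pyGet? rest 0 == some '.')
    && (PySem.List.pyGet? rest 1 == some 'p' || PySem.List.pyGet? rest 1 == some 'P')
    && (PySem.List.pyGet? rest 2 == some 'y' || PySem.List.pyGet? rest 2 == some 'Y')

def check_alt (s : String) : Bool :=
  if ¬ (1 ≤ PySem.Str.len s ∧ PySem.Str.len s ≤ 128) then false
  else pvTail s.toList

-- ===== PRECONDITION & SPEC =====
-- On filenames of the form base.py (case-insensitive extension, length ≤ 128) whose base is made of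
-- ASCII letters/underscores and contains 'Z', A returns False (its test 'A' <= i < 'Z' excludes 'Z')
-- while B returns True, the intended answer for a filename validator.
def D_check (s : String) : Prop :=
  s.toList.length ≤ 128 ∧
  PySem.Chars.lower (s.toList.drop (s.toList.length - 3)) = ['.', 'p', 'y'] ∧
  (s.toList.take (s.toList.length - 3)).all (fun c => c.isUpper || c.isLower || c == '_') = true ∧
  'Z' ∈ s.toList.take (s.toList.length - 3)
instance (s : String) : Decidable (D_check s) := by unfold D_check; infer_instance

def Spec_check (s : String) (out : Bool) : Prop := ¬ D_check s → out = check_alt s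
instance (s : String) (out : Bool) : Decidable (Spec_check s out) := by unfold Spec_check; infer_instance

def pvDiffWitness_check : String := "Z.py"
def pvDiffWitnessOut_check : Bool × Bool := (false, true)

-- ===== CLAIM (what is proved, stated in full; the proofs are below) =====
def Claim_unchanged_check : Prop := ∀ (s : String), Dom_check s → Spec_check s (check s)
def Claim_changed_check : Prop := Dom_check (pvDiffWitness_check) ∧ D_check (pvDiffWitness_check) ∧ check (pvDiffWitness_check) = pvDiffWitnessOut_check.1 ∧ check_alt (pvDiffWitness_check) = pvDiffWitnessOut_check.2 ∧ pvDiffWitnessOut_check.1 ≠ pvDiffWitnessOut_check.2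
def Claim_exact_check : Prop := ∀ (s : String), Dom_check s → D_check s → check s ≠ check_alt s

-- ===== LEMMAS AND PROOFS =====

-- proof-only helpers: a direct recursive model of s.split(".") with a one-char separator
def pvGlue (p : List Char) : List (List Char) → List (List Char)
  | [] => [p]
  | x :: xs => (p ++ x) :: xs

def pvSplit1 : List Char → List (List Char)
  | [] => [[]]
  | c :: t => if c = '.' then [] :: pvSplit1 t else pvGlue [c] (pvSplit1 t)

-- A's character class written as a predicate without the dead '.' disjunct ('A'–'Y', 'a'–'z', '_')
def pvClassA (c : Char) : Bool :=
  (decide ('A' ≤ c) && decide (c ≤ 'Y')) || (decide ('a' ≤ c) && decide (c ≤ 'z')) || c == '_'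

-- generic "skip a p-prefix then expect case-insensitive .py" checker; pvTail = pvChk pvInClass
def pvChk (p : Char → Bool) (l : List Char) : Bool :=
  let rest := l.dropWhile p
  decide (rest.length = 3) && (PySem.List.pyGet? rest 0 == some '.')
    && (PySem.List.pyGet? rest 1 == some 'p' || PySem.List.pyGet? rest 1 == some 'P')
    && (PySem.List.pyGet? rest 2 == some 'y' || PySem.List.pyGet? rest 2 == some 'Y')

def pvOpts : List (List Char) := [['.','p','y'], ['.','p','Y'], ['.','P','y'], ['.','P','Y']]

theorem pvTail_eq_chk (l : List Char) : pvTail l = pvChk pvInClass l := rfl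

theorem pvSplit1_ne_nil (l : List Char) : pvSplit1 l ≠ [] := by
  cases l with
  | nil => simp [pvSplit1]
  | cons c t =>
    simp only [pvSplit1]
    split
    · simp
    · cases h : pvSplit1 t <;> simp [pvGlue]

theorem pvGlue_nil (l : List Char) : pvGlue [] (pvSplit1 l) = pvSplit1 l := by
  cases h : pvSplit1 l with
  | nil => exact absurd h (pvSplit1_ne_nil l)
  | cons x xs => simp [pvGlue]

theorem pvGlue_glue (p q : List Char) (xs : List (List Char)) :
    pvGlue p (pvGlue q xs) = pvGlue (p ++ q) xs := by
  cases xs <;> simp [pvGlue]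

theorem char_toNat_inj {a b : Char} (h : a.toNat = b.toNat) : a = b := by
  apply Char.ext; exact UInt32.toNat_inj.mp h

theorem splitOn_go_spec (fuel : Nat) :
    ∀ (l cur : List Char) (acc : List (List Char)), l.length ≤ fuel →
      PySem.Chars.splitOn.go ['.'] fuel l cur acc
        = acc.reverse ++ pvGlue cur.reverse (pvSplit1 l) := by
  induction fuel with
  | zero =>
    intro l cur acc h
    have : l = [] := List.eq_nil_of_length_eq_zero (Nat.le_zero.mp h)
    subst this
    simp [PySem.Chars.splitOn.go, pvSplit1, pvGlue]
  | succ fuel ih =>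
    intro l cur acc h
    cases l with
    | nil => simp [PySem.Chars.splitOn.go, pvSplit1, pvGlue]
    | cons c rest =>
      have hr : rest.length ≤ fuel := by simpa using Nat.succ_le_succ_iff.mp h
      by_cases hc : c = '.'
      · subst hc
        have hpre : List.isPrefixOf ['.'] ('.' :: rest) = true := by
          simp [List.isPrefixOf]
        simp only [PySem.Chars.splitOn.go, hpre, if_true]
        rw [ih _ _ _ (by simpa using hr)]
        cases hx : pvSplit1 rest with
        | nil => exact absurd hx (pvSplit1_ne_nil rest)
        | cons a as => simp [pvSplit1, pvGlue, hx]
      · have hpre : List.isPrefixOf ['.'] (c :: rest) = false := by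
          simp [List.isPrefixOf]
          exact fun hcc => absurd hcc.symm hc
        simp only [PySem.Chars.splitOn.go, hpre, Bool.false_eq_true, if_false]
        rw [ih _ _ _ hr]
        simp [pvSplit1, hc, pvGlue_glue]

theorem splitOn_eq_pvSplit1 (l : List Char) :
    PySem.Chars.splitOn l ['.'] = pvSplit1 l := by
  unfold PySem.Chars.splitOn
  rw [splitOn_go_spec (l.length + 1) l [] [] (by omega)]
  simp [pvGlue_nil]

-- A's body after the length guard, phrased on char lists
def pvBodyA (l : List Char) : Bool :=
  match pvSplit1 l with
  | [b, e] => (PySem.Chars.lower e == ['p', 'y']) && b.all pvOkA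
  | _ => false

theorem lowerChar_beq (a lo up : Char) (hlo : 97 ≤ lo.toNat ∧ lo.toNat ≤ 122)
    (hup : up.toNat = lo.toNat - 32) :
    (PySem.Chars.lowerChar a == lo) = (a == lo || a == up) := by
  unfold PySem.Chars.lowerChar PySem.Chars.isupper
  by_cases h : ('A' ≤ a ∧ a ≤ 'Z')
  · have h1 : 65 ≤ a.toNat := h.1
    have h2 : a.toNat ≤ 90 := h.2
    simp only [h.1, h.2, decide_true, Bool.and_self, if_true]
    have hv : (Char.ofNat (a.toNat + 32)).toNat = a.toNat + 32 := by
      simp [Char.toNat_ofNat]; omega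
    by_cases he : a = up
    · subst he
      have hlo' : Char.ofNat (a.toNat + 32) = lo := by
        apply char_toNat_inj; rw [hv]; omega
      simp [hlo']
    · have hne1 : Char.ofNat (a.toNat + 32) ≠ lo := by
        intro hc
        apply he; apply char_toNat_inj
        have := congrArg Char.toNat hc
        rw [hv] at this; omega
      have hne2 : a ≠ lo := by
        intro hc; subst hc; omega
      rw [beq_eq_false_iff_ne.mpr hne1, beq_eq_false_iff_ne.mpr hne2,
        beq_eq_false_iff_ne.mpr he]
      rfl
  · have hnu : a ≠ up := by
      intro hc; subst hc
      apply h
      constructor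
      · show 65 ≤ a.toNat; omega
      · show a.toNat ≤ 90; omega
    have hiff : (decide ('A' ≤ a) && decide (a ≤ 'Z')) = false := by
      rcases Decidable.not_and_iff_or_not.mp h with h' | h' <;> simp [h']
    rw [hiff]
    simp [hnu]

theorem pvOkA_of_inClass (c : Char) (h : pvClassA c = true) : pvOkA c = true := by
  unfold pvClassA at h
  unfold pvOkA
  rcases Bool.or_eq_true_iff.mp h with h' | h'
  · rcases Bool.or_eq_true_iff.mp h' with h'' | h''
    · have h1 : 65 ≤ c.toNat := of_decide_eq_true (Bool.and_eq_true_iff.mp h'').1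
      have h2 : c.toNat ≤ 89 := of_decide_eq_true (Bool.and_eq_true_iff.mp h'').2
      have : ('A' ≤ c) ∧ (c < 'Z') := ⟨h1, show c.toNat < 90 by omega⟩
      simp [this.1, this.2]
    · simp [Bool.and_eq_true_iff.mp h'']
  · simp [h']

theorem pvOkA_of_not (c : Char) (hc : c ≠ '.') (h : pvClassA c = false) : pvOkA c = false := by
  unfold pvClassA at h
  unfold pvOkA
  rcases Bool.or_eq_false_iff.mp h with ⟨h12, h3⟩
  rcases Bool.or_eq_false_iff.mp h12 with ⟨h1, h2⟩
  rw [h2, beq_eq_false_iff_ne.mpr hc, h3]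
  have : (decide ('A' ≤ c) && decide (c < 'Z')) = false := by
    rcases Bool.and_eq_false_iff.mp h1 with h' | h'
    · simp [of_decide_eq_false h']
    · have : c.toNat > 89 := Nat.lt_of_not_le (of_decide_eq_false h')
      have : ¬ (c < 'Z') := fun hlt => by
        have : c.toNat < 90 := hlt
        omega
      simp [this]
  simp [this]

theorem pvSplit1_no_dot (t : List Char) (h : '.' ∉ t) : pvSplit1 t = [t] := by
  induction t with
  | nil => rfl
  | cons c r ih =>
    have hc : c ≠ '.' := fun hc => h (hc ▸ List.mem_cons_self ..)
    have hr : '.' ∉ r := fun hm => h (List.mem_cons_of_mem _ hm)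
    simp [pvSplit1, hc, ih hr, pvGlue]

theorem pvSplit1_dot_len (t : List Char) (h : '.' ∈ t) :
    ∃ x y r, pvSplit1 t = x :: y :: r := by
  induction t with
  | nil => cases h
  | cons c r ih =>
    by_cases hc : c = '.'
    · subst hc
      cases hx : pvSplit1 r with
      | nil => exact absurd hx (pvSplit1_ne_nil r)
      | cons x xs => exact ⟨[], x, xs, by simp [pvSplit1, hx]⟩
    · have hr : '.' ∈ r := by
        rcases List.mem_cons.mp h with h' | h'
        · exact absurd h'.symm hc
        · exact h'
      obtain ⟨x, y, rr, hx⟩ := ih hr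
      exact ⟨[c] ++ x, y, rr, by simp [pvSplit1, hc, hx, pvGlue]⟩

theorem pvBodyA_cons_ne (c : Char) (t : List Char) (hc : c ≠ '.') :
    pvBodyA (c :: t) = (pvOkA c && pvBodyA t) := by
  unfold pvBodyA
  simp only [pvSplit1, hc, if_false]
  cases h : pvSplit1 t with
  | nil => exact absurd h (pvSplit1_ne_nil t)
  | cons x xs =>
    cases xs with
    | nil => simp [pvGlue]
    | cons y ys =>
      cases ys with
      | nil =>
        simp only [pvGlue, List.singleton_append]
        simp [List.all_cons, Bool.and_left_comm]
      | cons z zs => simp [pvGlue]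

theorem pvBody_eq (l : List Char) : pvBodyA l = pvChk pvClassA l := by
  induction l with
  | nil => rfl
  | cons c t ih =>
    by_cases hc : c = '.'
    · subst hc
      have hcl : pvClassA '.' = false := by decide
      have hdw : ('.' :: t).dropWhile pvClassA = '.' :: t := by
        simp [hcl]
      unfold pvChk
      simp only [hdw]
      by_cases hd : '.' ∈ t
      · obtain ⟨x, y, r, hx⟩ := pvSplit1_dot_len t hd
        have hA : pvBodyA ('.' :: t) = false := by
          unfold pvBodyA
          simp [pvSplit1, hx]
        rw [hA]
        match t, hd with
        | [a, b], hd =>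
          rcases List.mem_pair.mp hd with h' | h' <;> subst h' <;>
            simp [PySem.List.pyGet?, PySem.List.pyIdx?]
        | [], hd => cases hd
        | [a], hd => rfl
        | a :: b :: c' :: r, hd =>
          simp
      · have hA : pvBodyA ('.' :: t) = (PySem.Chars.lower t == ['p', 'y']) := by
          unfold pvBodyA
          simp [pvSplit1, pvSplit1_no_dot t hd]
        match t, hd with
        | [], _ =>
          rw [hA]
          rfl
        | [a], _ =>
          rw [hA, beq_eq_false_iff_ne.mpr
            (fun hh => by simpa [PySem.Chars.lower] using congrArg List.length hh)]
          rfl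
        | [a, b], hd =>
          have hL : (PySem.Chars.lower [a, b] == ['p', 'y'])
              = ((a == 'p' || a == 'P') && (b == 'y' || b == 'Y')) := by
            show (PySem.Chars.lowerChar a == 'p' && (PySem.Chars.lowerChar b == 'y' && true)) = _
            rw [lowerChar_beq a 'p' 'P' (by decide) (by decide),
              lowerChar_beq b 'y' 'Y' (by decide) (by decide)]
            simp
          rw [hA, hL]
          simp [PySem.List.pyGet?, PySem.List.pyIdx?]
        | a :: b :: c' :: r, _ =>
          rw [hA, beq_eq_false_iff_ne.mpr
            (fun hh => by simpa [PySem.Chars.lower] using congrArg List.length hh)]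
          simp
    · rw [pvBodyA_cons_ne c t hc]
      by_cases hin : pvClassA c = true
      · have hdw : (c :: t).dropWhile pvClassA = t.dropWhile pvClassA := by
          simp [hin]
        unfold pvChk
        simp only [hdw]
        rw [pvOkA_of_inClass c hin, Bool.true_and, ih]
        rfl
      · have hin' : pvClassA c = false := by
          cases h : pvClassA c
          · rfl
          · exact absurd h hin
        rw [pvOkA_of_not c hc hin', Bool.false_and]
        have hdw : (c :: t).dropWhile pvClassA = c :: t := by
          simp [hin']
        unfold pvChk
        simp only [hdw]
        cases t with
        | nil => rfl
        | cons y ys =>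
          cases ys with
          | nil => rfl
          | cons z zs =>
            cases zs with
            | nil =>
              simp [PySem.List.pyGet?, PySem.List.pyIdx?, beq_eq_false_iff_ne.mpr hc]
            | cons w ws => simp

theorem check_eq_body (s : String) :
    check s = (if ¬ (1 ≤ PySem.Str.len s ∧ PySem.Str.len s ≤ 128) then false
               else pvBodyA s.toList) := by
  unfold check
  have hsplit : PySem.Str.split? s "." = some ((pvSplit1 s.toList).map String.ofList) := by
    unfold PySem.Str.split? PySem.Chars.split?
    simp [splitOn_eq_pvSplit1]
  rw [hsplit]
  by_cases hg : 1 ≤ PySem.Str.len s ∧ PySem.Str.len s ≤ 128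
  · rw [if_neg (by omega : ¬ (PySem.Str.len s < 1 ∨ PySem.Str.len s > 128)),
      if_neg (not_not_intro hg)]
    cases h : pvSplit1 s.toList with
    | nil => exact absurd h (pvSplit1_ne_nil _)
    | cons x xs =>
      cases xs with
      | nil => simp [pvBodyA, h]
      | cons y ys =>
        cases ys with
        | nil =>
          simp only [List.map]
          rw [if_neg (by simp)]
          by_cases hpy : PySem.Chars.lower y = ['p', 'y']
          · have hstr : PySem.Str.lower (String.ofList y) = "py" := by
              unfold PySem.Str.lower
              have : (String.ofList y).toList = y := by simp
              rw [this, hpy]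
            rw [if_neg (not_not_intro hstr)]
            simp [pvBodyA, h, hpy]
          · have hstr : PySem.Str.lower (String.ofList y) ≠ "py" := by
              intro hh
              apply hpy
              have := congrArg String.toList hh
              simpa [PySem.Str.lower] using this
            rw [if_pos hstr]
            simp [pvBodyA, h, beq_eq_false_iff_ne.mpr hpy]
        | cons z zs =>
          simp only [List.map]
          rw [if_pos (by simp)]
          simp [pvBodyA, h]
  · rw [if_pos (by omega : PySem.Str.len s < 1 ∨ PySem.Str.len s > 128),
      if_pos hg]

-- the inner test of pvChk on the already-dropped rest equals membership in pvOpts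
theorem pvChkBody_eq (rest : List Char) :
    (decide (rest.length = 3) && (PySem.List.pyGet? rest 0 == some '.')
      && (PySem.List.pyGet? rest 1 == some 'p' || PySem.List.pyGet? rest 1 == some 'P')
      && (PySem.List.pyGet? rest 2 == some 'y' || PySem.List.pyGet? rest 2 == some 'Y'))
    = decide (rest ∈ pvOpts) := by
  match rest with
  | [] => simp [pvOpts, PySem.List.pyGet?, PySem.List.pyIdx?]
  | [a] => simp [pvOpts, PySem.List.pyGet?, PySem.List.pyIdx?]
  | [a, b] => simp [pvOpts, PySem.List.pyGet?, PySem.List.pyIdx?]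
  | [a, b, c] =>
    by_cases ha : a = '.' <;> by_cases hb : b = 'p' <;> by_cases hb' : b = 'P' <;>
      by_cases hc : c = 'y' <;> by_cases hc' : c = 'Y' <;>
      simp [ha, hb, hb', hc, hc', pvOpts, PySem.List.pyGet?, PySem.List.pyIdx?]
  | a :: b :: c :: d :: r =>
    have hnm : (a :: b :: c :: d :: r) ∉ pvOpts := by
      intro hmem
      simp only [pvOpts, List.mem_cons, List.not_mem_nil, or_false] at hmem
      rcases hmem with h | h | h | h <;> exact absurd (congrArg List.length h) (by simp)
    simp [hnm]

-- the scan-based checker characterised by take/drop at length − 3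
theorem pvChk_true_iff (p : Char → Bool) (hp : p '.' = false) (l : List Char) :
    pvChk p l = true ↔
      (l.drop (l.length - 3) ∈ pvOpts ∧ ∀ c ∈ l.take (l.length - 3), p c = true) := by
  unfold pvChk
  rw [pvChkBody_eq]
  constructor
  · intro h
    have hmem : l.dropWhile p ∈ pvOpts := of_decide_eq_true h
    obtain ⟨tw, dw, hsplit, htw, hdw⟩ :
        ∃ tw dw, l = tw ++ dw ∧ (∀ c ∈ tw, p c = true) ∧ dw = l.dropWhile p :=
      ⟨l.takeWhile p, l.dropWhile p, (List.takeWhile_append_dropWhile (p := p) (l := l)).symm,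
        fun c hc => List.mem_takeWhile_imp hc, rfl⟩
    rw [← hdw] at hmem
    have hlen3 : dw.length = 3 := by
      simp only [pvOpts, List.mem_cons, List.not_mem_nil, or_false] at hmem
      rcases hmem with h' | h' | h' | h' <;> simp [h']
    have hlsum : l.length = tw.length + 3 := by
      rw [hsplit, List.length_append, hlen3]
    have hn : l.length - 3 = tw.length := by omega
    have htake : l.take (l.length - 3) = tw := by
      rw [hn, hsplit]
      exact List.take_left ..
    have hdrop : l.drop (l.length - 3) = dw := by
      rw [hn, hsplit]
      exact List.drop_left ..
    refine ⟨hdrop ▸ hmem, fun c hc => ?_⟩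
    rw [htake] at hc
    exact htw c hc
  · rintro ⟨hmem, hall⟩
    have hbt : l.take (l.length - 3) ++ l.drop (l.length - 3) = l :=
      List.take_append_drop _ l
    have hbnil : (l.take (l.length - 3)).dropWhile p = [] :=
      List.dropWhile_eq_nil_iff.mpr hall
    have ht : (l.drop (l.length - 3)).dropWhile p = l.drop (l.length - 3) := by
      simp only [pvOpts, List.mem_cons, List.not_mem_nil, or_false] at hmem
      rcases hmem with h' | h' | h' | h' <;> simp [h', hp]
    have hdw : l.dropWhile p = l.drop (l.length - 3) := by
      conv_lhs => rw [← hbt]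
      rw [List.dropWhile_append]
      simp [hbnil, ht]
    rw [hdw]
    exact decide_eq_true hmem

theorem isUpper_eq (c : Char) : c.isUpper = (decide ('A' ≤ c) && decide (c ≤ 'Z')) := by
  show decide (c.val ≥ 'A'.val ∧ c.val ≤ 'Z'.val) = _
  rw [show decide (c.val ≥ 'A'.val ∧ c.val ≤ 'Z'.val) = decide ('A' ≤ c ∧ c ≤ 'Z') from
      decide_eq_decide.mpr ⟨fun h => h, fun h => h⟩]
  simp

theorem isLower_eq (c : Char) : c.isLower = (decide ('a' ≤ c) && decide (c ≤ 'z')) := by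
  show (decide (c.val ≥ 'a'.val) && decide (c.val ≤ 'z'.val)) = _
  rw [show decide (c.val ≥ 'a'.val) = decide ('a' ≤ c) from
      decide_eq_decide.mpr ⟨fun h => h, fun h => h⟩,
    show decide (c.val ≤ 'z'.val) = decide (c ≤ 'z') from
      decide_eq_decide.mpr ⟨fun h => h, fun h => h⟩]

theorem class_funext :
    (fun c : Char => c.isUpper || c.isLower || c == '_') = pvInClass :=
  funext fun c => by rw [isUpper_eq, isLower_eq]; rfl

theorem lowerChar_dot (a : Char) : PySem.Chars.lowerChar a = '.' ↔ a = '.' := by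
  unfold PySem.Chars.lowerChar PySem.Chars.isupper
  by_cases h : ('A' ≤ a ∧ a ≤ 'Z')
  · have h1 : 65 ≤ a.toNat := h.1
    have h2 : a.toNat ≤ 90 := h.2
    simp only [h.1, h.2, decide_true, Bool.and_self, if_true]
    constructor
    · intro hc
      exfalso
      have hv : (Char.ofNat (a.toNat + 32)).toNat = a.toNat + 32 := by
        simp [Char.toNat_ofNat]; omega
      have := congrArg Char.toNat hc
      rw [hv] at this
      have hdot : ('.' : Char).toNat = 46 := by decide
      omega
    · intro hc
      subst hc
      exact absurd h1 (by decide)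
  · have hiff : (decide ('A' ≤ a) && decide (a ≤ 'Z')) = false := by
      rcases Decidable.not_and_iff_or_not.mp h with h' | h' <;> simp [h']
    rw [hiff]
    simp

theorem lowerChar_eq_iff (a lo up : Char) (hlo : 97 ≤ lo.toNat ∧ lo.toNat ≤ 122)
    (hup : up.toNat = lo.toNat - 32) :
    PySem.Chars.lowerChar a = lo ↔ (a = lo ∨ a = up) := by
  have hb := lowerChar_beq a lo up hlo hup
  constructor
  · intro h
    have ht : (PySem.Chars.lowerChar a == lo) = true := beq_iff_eq.mpr h
    rw [hb] at ht
    simpa using ht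
  · intro h
    have ht : (a == lo || a == up) = true := by rcases h with h | h <;> simp [h]
    rw [← hb] at ht
    exact beq_iff_eq.mp ht

theorem lower_tail_iff (t : List Char) :
    PySem.Chars.lower t = ['.', 'p', 'y'] ↔ t ∈ pvOpts := by
  constructor
  · intro h
    have hl3 : t.length = 3 := by
      have := congrArg List.length h
      simpa [PySem.Chars.lower] using this
    match t, hl3 with
    | [a, b, c], _ =>
      simp only [PySem.Chars.lower, List.map, List.cons.injEq, and_true] at h
      obtain ⟨h1, h2, h3⟩ := h
      have ha := (lowerChar_dot a).mp h1
      have hbv := (lowerChar_eq_iff b 'p' 'P' (by decide) (by decide)).mp h2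
      have hcv := (lowerChar_eq_iff c 'y' 'Y' (by decide) (by decide)).mp h3
      subst ha
      rcases hbv with hb | hb <;> rcases hcv with hc | hc <;> subst hb <;> subst hc <;>
        simp [pvOpts]
  · intro h
    simp only [pvOpts, List.mem_cons, List.not_mem_nil, or_false] at h
    rcases h with h | h | h | h <;> subst h <;> rfl

theorem classA_mono (c : Char) (h : pvClassA c = true) : pvInClass c = true := by
  unfold pvClassA at h
  unfold pvInClass
  simp only [Bool.or_eq_true, Bool.and_eq_true, decide_eq_true_eq, beq_iff_eq] at h ⊢
  rcases h with (⟨h1, h2⟩ | hb) | hc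
  · have h2' : c.toNat ≤ 89 := h2
    exact Or.inl (Or.inl ⟨h1, show c.toNat ≤ 90 by omega⟩)
  · exact Or.inl (Or.inr hb)
  · exact Or.inr hc

theorem classB_ne_Z (c : Char) (h : pvInClass c = true) (hz : c ≠ 'Z') : pvClassA c = true := by
  unfold pvInClass at h
  unfold pvClassA
  simp only [Bool.or_eq_true, Bool.and_eq_true, decide_eq_true_eq, beq_iff_eq] at h ⊢
  rcases h with (⟨h1, h2⟩ | hb) | hc
  · have h2' : c.toNat ≤ 90 := h2
    have hne : c.toNat ≠ 90 := fun hn => hz (char_toNat_inj (by simpa using hn))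
    exact Or.inl (Or.inl ⟨h1, show c.toNat ≤ 89 by omega⟩)
  · exact Or.inl (Or.inr hb)
  · exact Or.inr hc

theorem str_len_cast (s : String) : PySem.Str.len s = (s.toList.length : Int) := by
  simp [PySem.Str.len]

-- ===== VERDICT (by name: the statement is the Claim_ definition above) =====
theorem check_spec : Claim_unchanged_check := by
  intro s _ hnd
  show check s = check_alt s
  rw [check_eq_body, pvBody_eq]
  unfold check_alt
  by_cases hg : (1 ≤ PySem.Str.len s ∧ PySem.Str.len s ≤ 128)
  · rw [if_neg (not_not_intro hg), if_neg (not_not_intro hg), pvTail_eq_chk]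
    have hpA : pvClassA '.' = false := by decide
    have hpB : pvInClass '.' = false := by decide
    cases hB : pvChk pvInClass s.toList with
    | false =>
      cases hA : pvChk pvClassA s.toList with
      | false => rfl
      | true =>
        exfalso
        obtain ⟨hm, hall⟩ := (pvChk_true_iff pvClassA hpA _).mp hA
        have : pvChk pvInClass s.toList = true :=
          (pvChk_true_iff pvInClass hpB _).mpr ⟨hm, fun c hc => classA_mono c (hall c hc)⟩
        rw [hB] at this
        exact Bool.false_ne_true this
    | true =>
      obtain ⟨hm, hall⟩ := (pvChk_true_iff pvInClass hpB _).mp hB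
      have h128 : s.toList.length ≤ 128 := by
        have h2 := hg.2
        rw [str_len_cast] at h2
        exact_mod_cast h2
      have hZ : 'Z' ∉ s.toList.take (s.toList.length - 3) := by
        intro hz
        refine hnd ⟨h128, (lower_tail_iff _).mpr hm, ?_, hz⟩
        rw [class_funext]
        exact List.all_eq_true.mpr hall
      refine (pvChk_true_iff pvClassA hpA _).mpr
        ⟨hm, fun c hc => classB_ne_Z c (hall c hc) (fun he => hZ (he ▸ hc))⟩
  · rw [if_pos hg, if_pos hg]

set_option maxRecDepth 10000 in
theorem check_changed : Claim_changed_check := by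
  unfold Claim_changed_check
  exact ⟨by decide, by decide, by decide, by decide, by decide⟩

theorem check_tight : Claim_exact_check := by
  intro s _ hD
  obtain ⟨h128, hm, hball, hZ⟩ := hD
  have hlen1 : 1 ≤ s.toList.length := by
    have hmem : 'Z' ∈ s.toList := List.mem_of_mem_take hZ
    exact List.length_pos_of_mem hmem
  have hg : 1 ≤ PySem.Str.len s ∧ PySem.Str.len s ≤ 128 := by
    rw [str_len_cast]
    exact ⟨by exact_mod_cast hlen1, by exact_mod_cast h128⟩
  rw [check_eq_body, pvBody_eq]
  unfold check_alt
  rw [if_neg (not_not_intro hg), if_neg (not_not_intro hg), pvTail_eq_chk]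
  have hBtrue : pvChk pvInClass s.toList = true :=
    (pvChk_true_iff pvInClass (by decide) _).mpr
      ⟨(lower_tail_iff _).mp hm, fun c hc => by
        rw [class_funext] at hball
        exact List.all_eq_true.mp hball c hc⟩
  have hAfalse : pvChk pvClassA s.toList = false := by
    cases hA : pvChk pvClassA s.toList with
    | false => rfl
    | true =>
      exfalso
      obtain ⟨_, hall⟩ := (pvChk_true_iff pvClassA (by decide) _).mp hA
      exact absurd (hall 'Z' hZ) (by decide)
  rw [hBtrue, hAfalse]
  simp
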